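-- pv_equiv track=rewrite | github.com/manwar/perlweeklychallenge-club | challenge-349/lubos-kolouch/python/ch-1.py | power_string
-- ===== SOURCE A (Python) =====
-- def power_string(text: str) -> int:
--     """Return the maximum run length of a repeated character inside ``text``."""
--     if not text:
--         raise ValueError("Expected a non-empty string")
--
--     best = 0
--     current = 0
--     previous = ""
--
--     for char in text:
--         if char == previous:
--             current += 1
--         else:
--             previous = char
--             current = 1
--         if current > best:
--             best = current
--     return best
-- ===== SOURCE B (Python) =====
-- def power_string(text: str) -> int:
--     """Return the maximum run length of a repeated character inside ``text``."""
--     if not text: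
--         raise ValueError("Expected a non-empty string")
--
--     runs = []
--     i = 0
--     n = len(text)
--     while i < n:
--         j = i + 1
--         while j < n and text[j] == text[i]:
--             j += 1
--         runs.append(j - i)
--         i = j
--     return max(runs)
-- ===== Notes on version B (the rewrite author's own statement) =====
-- stated objective: alternative
-- what changed: B segments the string into maximal runs of equal characters (groupby-style span scan) and then takes the maximum of the run lengths, instead of A's single pass tracking previous/current/best counters.
import Mathlib
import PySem

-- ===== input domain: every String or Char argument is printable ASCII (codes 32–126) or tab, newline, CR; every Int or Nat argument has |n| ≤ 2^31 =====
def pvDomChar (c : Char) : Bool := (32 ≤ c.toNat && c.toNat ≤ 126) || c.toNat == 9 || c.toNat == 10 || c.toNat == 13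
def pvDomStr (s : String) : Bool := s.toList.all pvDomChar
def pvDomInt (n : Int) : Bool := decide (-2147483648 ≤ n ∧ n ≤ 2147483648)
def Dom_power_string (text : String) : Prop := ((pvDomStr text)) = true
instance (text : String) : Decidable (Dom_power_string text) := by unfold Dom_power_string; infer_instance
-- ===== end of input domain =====

-- B is an alternative same-cost implementation: it segments the string into maximal runs and maximises their lengths.

-- ===== PORT A =====
-- Python's `previous` starts as "" and afterwards always holds a one-character string;
-- it is modelled as Option Char (none = "", some c = the char), the comparison `char == previous` is exact.
def pwAuxA : List Char → Int → Int → Option Char → Int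
  | [], best, _, _ => best
  | c :: rest, best, current, previous =>
    let st := if some c = previous then (current + 1, previous) else ((1 : Int), some c)
    let best' := if st.1 > best then st.1 else best
    pwAuxA rest best' st.1 st.2

def power_string (text : String) : Int :=
  pwAuxA text.toList 0 0 none

-- ===== PORT B =====
-- the outer while loop of Source B: peel off one maximal run at a time (the inner `while` is the span scan)
def runsB (l : List Char) : List Nat :=
  match l with
  | [] => []
  | c :: rest => (1 + (rest.takeWhile (· == c)).length) :: runsB (rest.dropWhile (· == c))
termination_by l.length
decreasing_by
  exact Nat.lt_succ_of_le (List.length_dropWhile_le _ _)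

-- `max(runs)`: runs is nonempty (text ≠ "") and all entries are ≥ 1, so foldl max 0 is Python's max
def power_string_alt (text : String) : Int :=
  ((runsB text.toList).foldl Nat.max 0 : Nat)

-- ===== PRECONDITION & SPEC =====
-- Pre_ excludes exactly the empty string, on which A raises ValueError (B raises too).
def Pre_power_string (text : String) : Prop := text.toList ≠ []
instance (text : String) : Decidable (Pre_power_string text) := by unfold Pre_power_string; infer_instance

def pvWitness_power_string : String := "aabbba"

def Spec_power_string (text : String) (out : Int) : Prop := out = power_string_alt text
instance (text : String) (out : Int) : Decidable (Spec_power_string text out) := by unfold Spec_power_string; infer_instance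

-- ===== CLAIM (what is proved, stated in full; the proofs are below) =====
def Claim_equal_power_string : Prop := ∀ (text : String), Dom_power_string text → Pre_power_string text → Spec_power_string text (power_string text)

-- ===== LEMMAS AND PROOFS =====

theorem foldl_max_init (l : List Nat) (a : Nat) :
    l.foldl Nat.max a = Nat.max a (l.foldl Nat.max 0) := by
  induction l generalizing a with
  | nil => simp
  | cons x xs ih =>
    simp only [List.foldl_cons]
    rw [ih (Nat.max a x), ih (Nat.max 0 x)]
    simp [Nat.max_assoc]

theorem maxRuns_cons (c : Char) (rest : List Char) :
    (runsB (c :: rest)).foldl Nat.max 0 =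
      Nat.max (1 + (rest.takeWhile (· == c)).length)
        ((runsB (rest.dropWhile (· == c))).foldl Nat.max 0) := by
  rw [runsB]
  simp only [List.foldl_cons]
  rw [foldl_max_init]
  simp

theorem pwAuxA_run (l : List Char) :
    ∀ (best k : Int) (c : Char), 0 ≤ k → k ≤ best →
    pwAuxA l best k (some c) =
      max best (max (k + ((l.takeWhile (· == c)).length : Int))
        (((runsB (l.dropWhile (· == c))).foldl Nat.max 0 : Nat) : Int)) := by
  induction l with
  | nil =>
    intro best k c hk hkb
    simp [pwAuxA, runsB]
    omega
  | cons d rest ih =>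
    intro best k c hk hkb
    by_cases hdc : d = c
    · subst hdc
      have hstep : pwAuxA (d :: rest) best k (some d) =
          pwAuxA rest (max best (k + 1)) (k + 1) (some d) := by
        simp only [pwAuxA]
        congr 1
        split_ifs <;> omega
      rw [hstep, ih (max best (k+1)) (k+1) d (by omega) (by omega)]
      simp
      omega
    · have hbeq : (d == c) = false := by simp [hdc]
      have hne : ¬ (some d = some c) := by simp [hdc]
      have hstep : pwAuxA (d :: rest) best k (some c) =
          pwAuxA rest (max best 1) 1 (some d) := by
        simp only [pwAuxA, if_neg hne]
        congr 1
        split_ifs <;> omega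
      rw [hstep, ih (max best 1) 1 d (by omega) (by omega)]
      simp [hbeq, maxRuns_cons]
      omega

-- ===== VERDICT (by name: the statement is the Claim_ definition above) =====
theorem power_string_spec : Claim_equal_power_string := by
  intro text _ hpre
  unfold Spec_power_string power_string power_string_alt
  cases h : text.toList with
  | nil => exact absurd h hpre
  | cons c rest =>
    have hstep : pwAuxA (c :: rest) 0 0 none = pwAuxA rest 1 1 (some c) := by
      simp [pwAuxA]
    rw [hstep, pwAuxA_run rest 1 1 c (by omega) (by omega), maxRuns_cons]
    push_cast
    omega
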